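-- pv_equiv track=rewrite | github.com/anirudh32/rbi-docs-rag-pipeline | src/ingest.py | add_chapter_ranges
-- ===== SOURCE A (Python) =====
-- def add_chapter_ranges(chapters, total_pages):
--     for i, ch in enumerate(chapters):
--         if i + 1 < len(chapters):
--             end = chapters[i + 1]["start_page"] - 1
--         else:
--             end = total_pages
--         ch["end_page"] = end
--     return chapters
-- ===== SOURCE B (Python) =====
-- def add_chapter_ranges(chapters, total_pages):
--     # single backward pass carrying the next chapter's start page
--     next_start = total_pages + 1
--     for i in range(len(chapters) - 1, 0, -1):
--         chapters[i]["end_page"] = next_start - 1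
--         next_start = chapters[i]["start_page"]
--     if chapters:
--         chapters[0]["end_page"] = next_start - 1
--     return chapters
-- ===== Notes on version B (the rewrite author's own statement) =====
-- stated objective: alternative
-- what changed: Replaces A's forward loop that looks ahead at chapters[i+1]['start_page'] by a backward index loop carrying a running next_start accumulator (initialized to total_pages+1), so each chapter's end_page comes from the accumulator and no lookahead or i+1<len branch exists.
import Mathlib
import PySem

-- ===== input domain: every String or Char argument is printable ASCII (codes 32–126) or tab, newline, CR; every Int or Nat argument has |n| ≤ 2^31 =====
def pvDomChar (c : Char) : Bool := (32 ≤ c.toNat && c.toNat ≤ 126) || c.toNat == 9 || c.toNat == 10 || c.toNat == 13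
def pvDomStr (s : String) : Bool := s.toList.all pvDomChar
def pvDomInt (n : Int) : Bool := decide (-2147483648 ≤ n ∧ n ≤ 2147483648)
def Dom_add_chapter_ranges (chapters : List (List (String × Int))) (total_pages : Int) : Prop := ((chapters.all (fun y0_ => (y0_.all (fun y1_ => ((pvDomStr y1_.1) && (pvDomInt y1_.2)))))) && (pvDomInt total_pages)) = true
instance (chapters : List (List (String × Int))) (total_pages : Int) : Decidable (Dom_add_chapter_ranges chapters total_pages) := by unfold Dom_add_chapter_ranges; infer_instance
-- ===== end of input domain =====

-- B replaces A's forward lookahead loop by a backward index loop carrying a next_start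
-- accumulator; objective: alternative, same cost. Both Pythons mutate the chapter dicts in
-- place; the equivalence proved here is about the returned value.

-- shared dict primitives (python d[k]=v / d[k] on the assoc-list representation)
def pyDictSet (d : List (String × Int)) (k : String) (v : Int) : List (String × Int) :=
  (PySem.Dict.insert (PySem.Dict.mk d) k v).items
def pyDictGet (d : List (String × Int)) (k : String) : Option Int :=
  (PySem.Dict.mk d).get? k

-- ===== PORT A =====
-- A's enumerate loop becomes structural recursion over the list: the branch `i+1 < len(chapters)`
-- is "is there a next chapter"; `chapters[i+1]["start_page"]` is the next element's "start_page".
-- Reading chapters[i+1] from the live list equals reading it from the input, since the loop only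
-- sets the distinct key "end_page". On inputs where Python raises KeyError (a non-first chapter
-- without "start_page", excluded by Pre_) the port uses default 0.
def add_chapter_ranges (chapters : List (List (String × Int))) (total_pages : Int) : List (List (String × Int)) :=
  match chapters with
  | [] => []
  | [ch] => [pyDictSet ch "end_page" total_pages]
  | ch :: next :: rest =>
      pyDictSet ch "end_page" ((pyDictGet next "start_page").getD 0 - 1)
        :: add_chapter_ranges (next :: rest) total_pages

-- ===== PORT B =====
-- literal port of Source B: foldl over range(len-1, 0, -1) with state (live chapter list, next_start);
-- the loop body sets chapters[i]["end_page"] then reads chapters[i]["start_page"] (getD 0 where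
-- Python raises KeyError, excluded by Pre_); afterwards chapters[0]["end_page"] is set if nonempty.
-- Indices produced by the range are ≥ 1, so `.toNat` is exact here.
def add_chapter_ranges_alt (chapters : List (List (String × Int))) (total_pages : Int) : List (List (String × Int)) :=
  let st :=
    (PySem.List.pyRange ((chapters.length : Int) - 1) 0 (-1)).foldl
      (fun (s : List (List (String × Int)) × Int) i =>
        let ch := pyDictSet (PySem.List.pyGetD s.1 i []) "end_page" (s.2 - 1)
        (s.1.set i.toNat ch, (pyDictGet ch "start_page").getD 0))
      (chapters, total_pages + 1)
  match st.1 with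
  | [] => []
  | ch0 :: rest => pyDictSet ch0 "end_page" (st.2 - 1) :: rest

-- ===== PRECONDITION & SPEC =====
-- Pre_ excludes exactly the inputs where the Python A raises KeyError: a chapter other than the
-- first that has no "start_page" key (the Python B raises there too).
def Pre_add_chapter_ranges (chapters : List (List (String × Int))) (total_pages : Int) : Prop :=
  ∀ ch ∈ chapters.tail, (pyDictGet ch "start_page").isSome
instance (chapters : List (List (String × Int))) (total_pages : Int) : Decidable (Pre_add_chapter_ranges chapters total_pages) := by unfold Pre_add_chapter_ranges; infer_instance
def pvWitness_add_chapter_ranges : (List (List (String × Int))) × Int :=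
  ([[("title", 7), ("start_page", 1)], [("start_page", 4)]], 10)

def Spec_add_chapter_ranges (chapters : List (List (String × Int))) (total_pages : Int) (out : List (List (String × Int))) : Prop := out = add_chapter_ranges_alt chapters total_pages
instance (chapters : List (List (String × Int))) (total_pages : Int) (out : List (List (String × Int))) : Decidable (Spec_add_chapter_ranges chapters total_pages out) := by unfold Spec_add_chapter_ranges; infer_instance

-- ===== CLAIM (what is proved, stated in full; the proofs are below) =====
def Claim_equal_add_chapter_ranges : Prop := ∀ (chapters : List (List (String × Int))) (total_pages : Int), Dom_add_chapter_ranges chapters total_pages → Pre_add_chapter_ranges chapters total_pages → Spec_add_chapter_ranges chapters total_pages (add_chapter_ranges chapters total_pages)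

-- ===== LEMMAS AND PROOFS =====

-- the loop body of B's fold, named for the proofs
def pvStep (s : List (List (String × Int)) × Int) (i : Int) : List (List (String × Int)) × Int :=
  let ch := pyDictSet (PySem.List.pyGetD s.1 i []) "end_page" (s.2 - 1)
  (s.1.set i.toNat ch, (pyDictGet ch "start_page").getD 0)

-- functional back-to-front processing: what B's fold computes over indices len-1 … 0
def pvBack (xs : List (List (String × Int))) (ns : Int) : List (List (String × Int)) × Int :=
  match xs with
  | [] => ([], ns)
  | c :: rest =>
      let r := pvBack rest ns
      let ch := pyDictSet c "end_page" (r.2 - 1)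
      (ch :: r.1, (pyDictGet ch "start_page").getD 0)

theorem pvStep_shift (i : Int) (hi : 1 ≤ i) (c : List (String × Int))
    (ys : List (List (String × Int))) (m : Int) :
    pvStep (c :: ys, m) i = (c :: (pvStep (ys, m) (i - 1)).1, (pvStep (ys, m) (i - 1)).2) := by
  obtain ⟨n, rfl⟩ : ∃ n : Nat, i = (n : Int) + 1 := ⟨(i - 1).toNat, by omega⟩
  have hc : ((n : Int) + 1) = (((n + 1 : Nat)) : Int) := by push_cast; ring
  have h1 : ((n : Int) + 1) - 1 = ((n : Nat) : Int) := by ring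
  have h2 : (((n + 1 : Nat)) : Int).toNat = n + 1 := by omega
  have h3 : ((n : Nat) : Int).toNat = n := by omega
  have h4 : (((n + 1 : Nat)) : Int) - 1 = ((n : Nat) : Int) := by push_cast; ring
  unfold pvStep
  simp only [hc, h4, h2, h3, PySem.List.pyGetD_natCast, List.getD_cons_succ, List.set]

theorem fold_shift (L : List Int) (hL : ∀ i ∈ L, 1 ≤ i) (c : List (String × Int)) :
    ∀ (ys : List (List (String × Int))) (m : Int),
      L.foldl pvStep (c :: ys, m) =
        (c :: ((L.map (· - 1)).foldl pvStep (ys, m)).1, ((L.map (· - 1)).foldl pvStep (ys, m)).2) := by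
  induction L with
  | nil => intro ys m; simp
  | cons i L ih =>
      intro ys m
      have hi : 1 ≤ i := hL i (by simp)
      have hL' : ∀ j ∈ L, 1 ≤ j := fun j hj => hL j (by simp [hj])
      simp only [List.foldl_cons, List.map_cons]
      rw [pvStep_shift i hi c ys m, ih hL']

theorem map_sub_one_pyRange (a b : Int) :
    (PySem.List.pyRange a b (-1)).map (· - 1) = PySem.List.pyRange (a - 1) (b - 1) (-1) := by
  rw [PySem.List.pyRange_neg_one, PySem.List.pyRange_neg_one]
  have h : a - b = (a - 1) - (b - 1) := by ring
  rw [← h]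
  simp only [List.map_map]
  apply List.map_congr_left
  intro k _
  simp only [Function.comp_apply]
  ring

theorem mem_pyRange_neg_one_ge (a b x : Int) (h : x ∈ PySem.List.pyRange a b (-1)) : b < x :=
  ((PySem.List.mem_pyRange_neg_one).1 h).1

-- range(m, -1, -1) is range(m, 0, -1) followed by the index 0
theorem pyRange_split_zero (m : Int) (hm : 0 ≤ m) :
    PySem.List.pyRange m (-1) (-1) = PySem.List.pyRange m 0 (-1) ++ [0] := by
  rw [PySem.List.pyRange_neg_one_eq_reverse, PySem.List.pyRange_neg_one_eq_reverse]
  norm_num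
  rw [PySem.List.pyRange_one_cons (show (0 : Int) < m + 1 by omega)]
  norm_num

-- the fold over indices len xs - 1 … 0 computes pvBack
theorem fold_eq_pvBack (xs : List (List (String × Int))) (ns : Int) :
    (PySem.List.pyRange ((xs.length : Int) - 1) (-1) (-1)).foldl pvStep (xs, ns) = pvBack xs ns := by
  induction xs generalizing ns with
  | nil => simp [PySem.List.pyRange_neg_one_eq_nil, pvBack]
  | cons c rest ih =>
      have hlen : ((c :: rest).length : Int) - 1 = (rest.length : Int) := by rw [List.length_cons]; push_cast; ring
      rw [hlen, pyRange_split_zero _ (by positivity), List.foldl_append]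
      have hge : ∀ i ∈ PySem.List.pyRange ((rest.length : Int)) 0 (-1), 1 ≤ i := by
        intro i hi
        have := mem_pyRange_neg_one_ge _ _ _ hi
        omega
      rw [fold_shift _ hge c rest ns, map_sub_one_pyRange,
        show ((0 : Int) - 1) = -1 by ring, ih]
      simp [pvStep, pvBack, PySem.List.pyGetD_zero_cons]

-- B's port, characterized structurally
theorem alt_cons (c : List (String × Int)) (rest : List (List (String × Int))) (tp : Int) :
    add_chapter_ranges_alt (c :: rest) tp =
      pyDictSet c "end_page" ((pvBack rest (tp + 1)).2 - 1) :: (pvBack rest (tp + 1)).1 := by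
  unfold add_chapter_ranges_alt
  have hlen : ((c :: rest).length : Int) - 1 = (rest.length : Int) := by rw [List.length_cons]; push_cast; ring
  have hge : ∀ i ∈ PySem.List.pyRange ((rest.length : Int)) 0 (-1), 1 ≤ i := by
    intro i hi
    have := mem_pyRange_neg_one_ge _ _ _ hi
    omega
  have hfold : (PySem.List.pyRange (((c :: rest).length : Int) - 1) 0 (-1)).foldl
      (fun (s : List (List (String × Int)) × Int) i =>
        let ch := pyDictSet (PySem.List.pyGetD s.1 i []) "end_page" (s.2 - 1)
        (s.1.set i.toNat ch, (pyDictGet ch "start_page").getD 0))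
      (c :: rest, tp + 1)
      = (c :: (pvBack rest (tp + 1)).1, (pvBack rest (tp + 1)).2) := by
    show (PySem.List.pyRange (((c :: rest).length : Int) - 1) 0 (-1)).foldl pvStep (c :: rest, tp + 1)
      = (c :: (pvBack rest (tp + 1)).1, (pvBack rest (tp + 1)).2)
    rw [hlen, fold_shift _ hge c rest (tp + 1), map_sub_one_pyRange,
      show ((0 : Int) - 1) = -1 by ring, fold_eq_pvBack]
  simp only [hfold]

-- inserting "end_page" does not change the "start_page" reading
theorem get_start_set_end (d : List (String × Int)) (v : Int) :
    pyDictGet (pyDictSet d "end_page" v) "start_page" = pyDictGet d "start_page" := by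
  unfold pyDictGet pyDictSet
  have hmk : (PySem.Dict.mk ((PySem.Dict.mk d).insert "end_page" v).items)
      = (PySem.Dict.mk d).insert "end_page" v := PySem.Dict.ext rfl
  rw [hmk]
  exact PySem.Dict.get?_insert_of_ne _ _ (by decide)

-- pvBack computes (A's result, the first chapter's start page reading)
theorem pvBack_spec (xs : List (List (String × Int))) (tp : Int) :
    (pvBack xs (tp + 1)).1 = add_chapter_ranges xs tp ∧
    (pvBack xs (tp + 1)).2 =
      (match xs with
       | [] => tp + 1
       | c :: _ => (pyDictGet c "start_page").getD 0) := by
  induction xs with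
  | nil => simp [pvBack, add_chapter_ranges]
  | cons c rest ih =>
      match rest, ih with
      | [], _ =>
          constructor
          · simp [pvBack, add_chapter_ranges, show tp + 1 - 1 = tp from by ring]
          · simp [pvBack, get_start_set_end]
      | c1 :: rest', ih =>
          constructor
          · show (pyDictSet c "end_page" ((pvBack (c1 :: rest') (tp + 1)).2 - 1)
                :: (pvBack (c1 :: rest') (tp + 1)).1) = _
            rw [ih.1, ih.2]
            rfl
          · show (pyDictGet (pyDictSet c "end_page" _) "start_page").getD 0 = _
            rw [get_start_set_end]

theorem add_chapter_ranges_eq_alt (chapters : List (List (String × Int))) (total_pages : Int) :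
    add_chapter_ranges chapters total_pages = add_chapter_ranges_alt chapters total_pages := by
  match chapters with
  | [] => rfl
  | c :: rest =>
      rw [alt_cons, (pvBack_spec rest total_pages).1, (pvBack_spec rest total_pages).2]
      match rest with
      | [] =>
          show add_chapter_ranges [c] total_pages
            = pyDictSet c "end_page" (total_pages + 1 - 1) :: add_chapter_ranges [] total_pages
          simp [add_chapter_ranges, show total_pages + 1 - 1 = total_pages from by ring]
      | c1 :: rest' => rfl

-- ===== VERDICT (by name: the statement is the Claim_ definition above) =====
theorem add_chapter_ranges_spec : Claim_equal_add_chapter_ranges := by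
  intro chapters total_pages _ _
  unfold Spec_add_chapter_ranges
  exact add_chapter_ranges_eq_alt chapters total_pages
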